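-- pv_equiv track=rewrite | github.com/Alex-Beng/yap-train | mona/nn/__init__.py | arr_to_string
-- ===== SOURCE A (Python) =====
-- def arr_to_string(arr):
--     temp = ""
--     last_word = "|"
--     for word in arr:
--         if word != last_word and word != "|":
--             temp += word
--         last_word = word
--     return temp
-- ===== SOURCE B (Python) =====
-- def arr_to_string(arr):
--     def collapse(seg):
--         # divide-and-conquer run-collapse: recursively collapse each half,
--         # then merge at the boundary (drop right's head if it equals left's last)
--         if len(seg) <= 1:
--             return list(seg)
--         mid = len(seg) // 2
--         left = collapse(seg[:mid])
--         right = collapse(seg[mid:])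
--         if left[-1] == right[0]:
--             return left + right[1:]
--         return left + right
--     return ''.join(k for k in collapse(arr) if k != '|')
-- ===== Notes on version B (the rewrite author's own statement) =====
-- stated objective: alternative
-- what changed: Replaces A's stateful single loop (tracking last_word while appending) with a divide-and-conquer run-collapse: recursively collapse each half of the list and merge at the boundary, then filter out the blank token '|' and join.
import Mathlib
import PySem

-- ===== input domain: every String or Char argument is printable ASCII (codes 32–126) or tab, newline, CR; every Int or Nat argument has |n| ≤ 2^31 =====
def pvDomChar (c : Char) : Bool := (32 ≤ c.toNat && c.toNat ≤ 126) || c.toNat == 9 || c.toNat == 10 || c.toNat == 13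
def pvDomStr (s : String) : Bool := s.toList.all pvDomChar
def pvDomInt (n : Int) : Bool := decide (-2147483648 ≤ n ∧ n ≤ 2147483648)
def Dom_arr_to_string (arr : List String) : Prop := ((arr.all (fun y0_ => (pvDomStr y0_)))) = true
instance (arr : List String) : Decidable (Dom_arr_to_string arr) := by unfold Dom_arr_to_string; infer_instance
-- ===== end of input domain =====

-- B collapses runs by divide-and-conquer (collapse halves, merge at the boundary) then filters '|' and joins,
-- instead of A's stateful single loop; a genuinely different traversal, not faster.

-- ===== PORT A =====
def arr_to_string_loop : List String → String → String → String
  | [], temp, _ => temp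
  | w :: rest, temp, last =>
      arr_to_string_loop rest (if w ≠ last ∧ w ≠ "|" then temp ++ w else temp) w

def arr_to_string (arr : List String) : String := arr_to_string_loop arr "" "|"

-- ===== PORT B =====
-- merge step of Source B's `collapse`: drop right's head iff it equals left's last element
def pvMerge (a b : List String) : List String :=
  match a.getLast?, b with
  | some la, y :: ys => if la = y then a ++ ys else a ++ b
  | _, _ => a ++ b

def pvCollapse (l : List String) : List String :=
  if l.length ≤ 1 then l
  else pvMerge (pvCollapse (l.take (l.length / 2))) (pvCollapse (l.drop (l.length / 2)))
termination_by l.length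
decreasing_by
  · simp only [List.length_take]; omega
  · simp only [List.length_drop]; omega

def arr_to_string_alt (arr : List String) : String :=
  String.join ((pvCollapse arr).filter (fun w => decide (w ≠ "|")))

-- ===== PRECONDITION & SPEC =====
def Spec_arr_to_string (arr : List String) (out : String) : Prop := out = arr_to_string_alt arr
instance (arr : List String) (out : String) : Decidable (Spec_arr_to_string arr out) := by unfold Spec_arr_to_string; infer_instance

-- ===== CLAIM (what is proved, stated in full; the proofs are below) =====
def Claim_equal_arr_to_string : Prop := ∀ (arr : List String), Dom_arr_to_string arr → Spec_arr_to_string arr (arr_to_string arr)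

-- ===== LEMMAS AND PROOFS =====

-- linear run-collapse, the common reference both ports are reduced to
def pvDedupFrom : String → List String → List String
  | _, [] => []
  | last, y :: ys => if y = last then pvDedupFrom last ys else y :: pvDedupFrom y ys

def pvDedup : List String → List String
  | [] => []
  | x :: xs => x :: pvDedupFrom x xs

lemma pvFoldlAppend (l : List String) : ∀ (a b : String),
    List.foldl (fun r s => r ++ s) (a ++ b) l = a ++ List.foldl (fun r s => r ++ s) b l := by
  induction l with
  | nil => intro a b; rfl
  | cons x xs ih => intro a b; simp only [List.foldl, String.append_assoc, ih]

lemma pvJoinCons (x : String) (l : List String) : String.join (x :: l) = x ++ String.join l := by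
  simp only [String.join, List.foldl]
  rw [show ("" ++ x : String) = x ++ "" by simp, pvFoldlAppend]

-- A's loop produces the blank-filtered linear run-collapse
lemma pvLoop_eq (arr : List String) : ∀ (last temp : String),
    arr_to_string_loop arr temp last =
      temp ++ String.join ((pvDedupFrom last arr).filter (fun w => decide (w ≠ "|"))) := by
  induction arr with
  | nil => intro last temp; simp [arr_to_string_loop, pvDedupFrom, String.join]
  | cons x xs ih =>
      intro last temp
      simp only [arr_to_string_loop, pvDedupFrom]
      by_cases hx : x = last
      · subst hx; simp [ih]
      · by_cases hb : x = "|"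
        · subst hb; simp [hx, ih]
        · rw [if_pos (And.intro hx hb), ih]
          simp [hx, hb, pvJoinCons, String.append_assoc]

def pvLastOf (x : String) : List String → String
  | [] => x
  | y :: ys => pvLastOf y ys

lemma pvDedupFrom_append (a : List String) : ∀ (l : String) (b : List String),
    pvDedupFrom l (a ++ b) = pvDedupFrom l a ++ pvDedupFrom (pvLastOf l a) b := by
  induction a with
  | nil => intro l b; simp [pvDedupFrom, pvLastOf]
  | cons x a' ih =>
      intro l b
      simp only [List.cons_append, pvDedupFrom, pvLastOf]
      by_cases hx : x = l
      · subst hx; simp [ih]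
      · simp [hx, ih]

lemma pvDedup_getLast? (a' : List String) : ∀ (x : String),
    (x :: pvDedupFrom x a').getLast? = some (pvLastOf x a') := by
  induction a' with
  | nil => intro x; rfl
  | cons y ys ih =>
      intro x
      simp only [pvDedupFrom, pvLastOf]
      by_cases hy : y = x
      · subst hy; simpa using ih y
      · rw [if_neg hy, List.getLast?_cons_cons]; exact ih y

lemma pvMerge_dedup (x y : String) (a' b' : List String) :
    pvMerge (pvDedup (x :: a')) (pvDedup (y :: b')) = pvDedup ((x :: a') ++ (y :: b')) := by
  have happ : pvDedupFrom x (a' ++ y :: b') =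
      pvDedupFrom x a' ++ pvDedupFrom (pvLastOf x a') (y :: b') := pvDedupFrom_append a' x _
  by_cases hq : pvLastOf x a' = y
  · simp only [pvMerge, pvDedup, pvDedup_getLast?, List.cons_append, happ, pvDedupFrom, hq]
    simp
  · simp only [pvMerge, pvDedup, pvDedup_getLast?, List.cons_append, happ, pvDedupFrom]
    rw [if_neg hq, if_neg (fun h => hq h.symm)]

lemma pvMergeDedup_ne (a b : List String) (ha : a ≠ []) (hb : b ≠ []) :
    pvMerge (pvDedup a) (pvDedup b) = pvDedup (a ++ b) := by
  match a, b with
  | x :: a', y :: b' => exact pvMerge_dedup x y a' b'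

lemma pvCollapse_eq (l : List String) : pvCollapse l = pvDedup l := by
  rw [pvCollapse]
  by_cases h : l.length ≤ 1
  · rw [if_pos h]
    match l with
    | [] => rfl
    | [x] => rfl
    | x :: y :: t => simp at h
  · rw [if_neg h]
    have h2 : 2 ≤ l.length := by omega
    have hta : l.take (l.length / 2) ≠ [] := by
      apply List.ne_nil_of_length_pos; simp only [List.length_take]; omega
    have hda : l.drop (l.length / 2) ≠ [] := by
      apply List.ne_nil_of_length_pos; simp only [List.length_drop]; omega
    rw [pvCollapse_eq (l.take (l.length / 2)), pvCollapse_eq (l.drop (l.length / 2)),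
      pvMergeDedup_ne _ _ hta hda, List.take_append_drop]
termination_by l.length
decreasing_by
  · simp only [List.length_take]; omega
  · simp only [List.length_drop]; omega

-- a leading blank run is filtered away either way
lemma pvFilter_top (arr : List String) :
    (pvDedupFrom "|" arr).filter (fun w => decide (w ≠ "|")) =
      (pvDedup arr).filter (fun w => decide (w ≠ "|")) := by
  match arr with
  | [] => rfl
  | x :: xs =>
    simp only [pvDedupFrom, pvDedup, List.filter_cons]
    by_cases hx : x = "|"
    · subst hx; simp
    · simp [hx]

-- ===== VERDICT (by name: the statement is the Claim_ definition above) =====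
theorem arr_to_string_spec : Claim_equal_arr_to_string := by
  intro arr _
  show arr_to_string arr = arr_to_string_alt arr
  rw [arr_to_string, arr_to_string_alt, pvLoop_eq, pvCollapse_eq, pvFilter_top]
  simp
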